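-- pv_equiv track=rewrite | github.com/prakritibhattrai/TalentTua-Automated-Web-Application | python/main.py | categorize_tech_jobs
-- ===== SOURCE A (Python) =====
-- def categorize_tech_jobs(tech_data, job_code):
--     # Filter tech data for the specific onetsoc_code
--     filtered_tech = [tech for tech in tech_data if tech.get('onetsoc_code') == job_code]
--
--     # Categorize into Hot, In-Demand, and Both
--     hot_techs = []
--     in_demand_techs = []
--     both_techs = []
--
--     for tech in filtered_tech:
--         if tech.get('hot_technology') == "Y" and tech.get('in_demand') == "Y":
--             both_techs.append(tech)
--         elif tech.get('hot_technology') == "Y":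
--             hot_techs.append(tech)
--         elif tech.get('in_demand') == "Y":
--             in_demand_techs.append(tech)
--
--     return hot_techs, in_demand_techs, both_techs
-- ===== SOURCE B (Python) =====
-- def categorize_tech_jobs(tech_data, job_code):
--     # Each category is defined independently by a total predicate over the raw
--     # input; three separate passes, no shared filtering step or bucket loop.
--     def flags(tech):
--         return (tech.get('onetsoc_code') == job_code,
--                 tech.get('hot_technology') == "Y",
--                 tech.get('in_demand') == "Y")
--
--     hot_techs = [t for t in tech_data if flags(t) == (True, True, False)]
--     in_demand_techs = [t for t in tech_data if flags(t) == (True, False, True)]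
--     both_techs = [t for t in tech_data if flags(t) == (True, True, True)]
--     return hot_techs, in_demand_techs, both_techs
-- ===== Notes on version B (the rewrite author's own statement) =====
-- stated objective: alternative
-- what changed: Replaces A's filter-then-single-mutating-bucket-loop by three independent declarative passes: each of the three result lists is its own comprehension selecting techs whose exact (code-match, hot, in_demand) flag triple defines that category, with no shared filtered list, no accumulator and no if/elif dispatch.
import Mathlib
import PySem

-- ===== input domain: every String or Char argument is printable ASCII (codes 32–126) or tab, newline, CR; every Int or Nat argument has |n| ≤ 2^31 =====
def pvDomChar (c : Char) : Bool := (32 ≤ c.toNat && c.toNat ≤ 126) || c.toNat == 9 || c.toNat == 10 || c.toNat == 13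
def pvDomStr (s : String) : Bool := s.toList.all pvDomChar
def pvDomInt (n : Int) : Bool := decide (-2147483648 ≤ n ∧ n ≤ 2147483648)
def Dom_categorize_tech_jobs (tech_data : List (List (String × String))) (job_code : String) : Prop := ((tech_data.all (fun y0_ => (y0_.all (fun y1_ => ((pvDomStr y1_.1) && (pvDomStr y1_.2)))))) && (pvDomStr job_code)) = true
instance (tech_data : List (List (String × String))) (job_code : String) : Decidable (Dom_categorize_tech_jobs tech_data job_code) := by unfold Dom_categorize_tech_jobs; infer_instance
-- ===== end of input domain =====

-- B replaces A's filter pass + mutating bucket loop by three independent declarative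
-- passes, one comprehension per category keyed on the exact flag triple (objective:
-- alternative decomposition, same cost).

-- tech.get(k) : first-match lookup in the association list (Python dict.get)
def pvGetTech (t : List (String × String)) (k : String) : Option String :=
  (PySem.Dict.mk t).get? k

-- ===== PORT A =====
def categorize_tech_jobs (tech_data : List (List (String × String))) (job_code : String) : (List (List (String × String))) × (List (List (String × String))) × (List (List (String × String))) :=
  let filtered_tech := tech_data.filter (fun tech => pvGetTech tech "onetsoc_code" == some job_code)
  filtered_tech.foldl
    (fun (acc : (List (List (String × String))) × (List (List (String × String))) × (List (List (String × String)))) tech =>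
      if pvGetTech tech "hot_technology" == some "Y" && pvGetTech tech "in_demand" == some "Y" then
        (acc.1, acc.2.1, acc.2.2 ++ [tech])
      else if pvGetTech tech "hot_technology" == some "Y" then
        (acc.1 ++ [tech], acc.2.1, acc.2.2)
      else if pvGetTech tech "in_demand" == some "Y" then
        (acc.1, acc.2.1 ++ [tech], acc.2.2)
      else acc)
    ([], [], [])

-- ===== PORT B =====
-- flags(tech) in Source B
def pvFlags (job_code : String) (tech : List (String × String)) : Bool × Bool × Bool :=
  (pvGetTech tech "onetsoc_code" == some job_code,
   pvGetTech tech "hot_technology" == some "Y",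
   pvGetTech tech "in_demand" == some "Y")

def categorize_tech_jobs_alt (tech_data : List (List (String × String))) (job_code : String) : (List (List (String × String))) × (List (List (String × String))) × (List (List (String × String))) :=
  let hot_techs := tech_data.filter (fun t => pvFlags job_code t == (true, true, false))
  let in_demand_techs := tech_data.filter (fun t => pvFlags job_code t == (true, false, true))
  let both_techs := tech_data.filter (fun t => pvFlags job_code t == (true, true, true))
  (hot_techs, in_demand_techs, both_techs)

-- ===== PRECONDITION & SPEC =====
def Spec_categorize_tech_jobs (tech_data : List (List (String × String))) (job_code : String) (out : (List (List (String × String))) × (List (List (String × String))) × (List (List (String × String)))) : Prop := out = categorize_tech_jobs_alt tech_data job_code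
instance (tech_data : List (List (String × String))) (job_code : String) (out : (List (List (String × String))) × (List (List (String × String))) × (List (List (String × String)))) : Decidable (Spec_categorize_tech_jobs tech_data job_code out) := by unfold Spec_categorize_tech_jobs; infer_instance

-- ===== CLAIM (what is proved, stated in full; the proofs are below) =====
def Claim_equal_categorize_tech_jobs : Prop := ∀ (tech_data : List (List (String × String))) (job_code : String), Dom_categorize_tech_jobs tech_data job_code → Spec_categorize_tech_jobs tech_data job_code (categorize_tech_jobs tech_data job_code)

-- ===== LEMMAS AND PROOFS =====
-- Invariant for A's bucket loop: starting from any accumulator it appends, per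
-- component, exactly the techs of the corresponding flag-triple category, in order.
theorem categorize_fold_eq (job_code : String) (l : List (List (String × String)))
    (acc : (List (List (String × String))) × (List (List (String × String))) × (List (List (String × String)))) :
    (l.filter (fun tech => pvGetTech tech "onetsoc_code" == some job_code)).foldl
      (fun acc tech =>
        if pvGetTech tech "hot_technology" == some "Y" && pvGetTech tech "in_demand" == some "Y" then
          (acc.1, acc.2.1, acc.2.2 ++ [tech])
        else if pvGetTech tech "hot_technology" == some "Y" then
          (acc.1 ++ [tech], acc.2.1, acc.2.2)
        else if pvGetTech tech "in_demand" == some "Y" then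
          (acc.1, acc.2.1 ++ [tech], acc.2.2)
        else acc) acc
    = (acc.1 ++ l.filter (fun t => pvFlags job_code t == (true, true, false)),
       acc.2.1 ++ l.filter (fun t => pvFlags job_code t == (true, false, true)),
       acc.2.2 ++ l.filter (fun t => pvFlags job_code t == (true, true, true))) := by
  induction l generalizing acc with
  | nil => simp
  | cons t rest ih =>
    rcases hc : (pvGetTech t "onetsoc_code" == some job_code) <;>
      rcases hh : (pvGetTech t "hot_technology" == some "Y") <;>
      rcases hi : (pvGetTech t "in_demand" == some "Y") <;>
    · have hf : ∀ b1 b2 b3 : Bool, (pvFlags job_code t == (b1, b2, b3))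
          = ((pvGetTech t "onetsoc_code" == some job_code) == b1
             && (((pvGetTech t "hot_technology" == some "Y") == b2)
                 && ((pvGetTech t "in_demand" == some "Y") == b3))) := by
        intro b1 b2 b3; rfl
      simp only [List.filter_cons, List.foldl_cons, hf, hc, hh, hi, Bool.true_and,
        Bool.false_and, Bool.and_true, Bool.and_false, Bool.true_beq, Bool.false_beq, Bool.not_true, Bool.not_false,
        Bool.false_eq_true, if_true, if_false]
      first
        | (rw [ih]; simp)
        | exact ih acc

-- ===== VERDICT (by name: the statement is the Claim_ definition above) =====
theorem categorize_tech_jobs_spec : Claim_equal_categorize_tech_jobs := by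
  intro tech_data job_code _
  unfold Spec_categorize_tech_jobs categorize_tech_jobs categorize_tech_jobs_alt
  simpa using categorize_fold_eq job_code tech_data ([], [], [])
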